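-- pv_equiv track=rewrite | github.com/silam741852963/web2product-catalog | components/url_seeder.py | _aggregate_roots
-- ===== SOURCE A (Python) =====
-- from typing import List, Optional, Dict, Any, Iterable, Set, Tuple
--
-- def _aggregate_roots(items: Iterable[Dict[str, Any]]) -> Tuple[Dict[str, int], List[str]]:
--     per_root: Dict[str, int] = {}
--     roots: List[str] = []
--     for it in items:
--         r = str(it.get("seed_root") or "").strip()
--         if not r:
--             continue
--         per_root[r] = per_root.get(r, 0) + 1
--         roots.append(r)
--     return per_root, sorted(set(roots))
-- ===== SOURCE B (Python) =====
-- from typing import List, Dict, Any, Iterable, Tuple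
--
-- def _aggregate_roots(items: Iterable[Dict[str, Any]]) -> Tuple[Dict[str, int], List[str]]:
--     # Sort-then-group: collect the cleaned roots, sort once, run-length encode the
--     # sorted list (two pointers) to get the sorted unique roots and their counts,
--     # then emit per_root in first-seen order via one lookup pass.
--     roots = [r for it in items if (r := str(it.get("seed_root") or "").strip())]
--     srt = sorted(roots)
--     uniq_sorted: List[str] = []
--     cnts: List[int] = []
--     i, n = 0, len(srt)
--     while i < n:
--         j = i + 1
--         while j < n and srt[j] == srt[i]:
--             j += 1
--         uniq_sorted.append(srt[i])
--         cnts.append(j - i)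
--         i = j
--     counts = dict(zip(uniq_sorted, cnts))
--     per_root = {r: counts[r] for r in dict.fromkeys(roots)}
--     return per_root, uniq_sorted
-- ===== Notes on version B (the rewrite author's own statement) =====
-- stated objective: alternative
-- what changed: Replaces A's single stateful loop that hash-counts into a dict while appending to a roots list by a sort-then-group algorithm: collect the cleaned roots, sort them once, run-length encode the sorted list with a two-pointer scan (giving the sorted unique roots and their counts directly, no set/sorted call), then emit per_root in first-seen order by one lookup pass.
import Mathlib
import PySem

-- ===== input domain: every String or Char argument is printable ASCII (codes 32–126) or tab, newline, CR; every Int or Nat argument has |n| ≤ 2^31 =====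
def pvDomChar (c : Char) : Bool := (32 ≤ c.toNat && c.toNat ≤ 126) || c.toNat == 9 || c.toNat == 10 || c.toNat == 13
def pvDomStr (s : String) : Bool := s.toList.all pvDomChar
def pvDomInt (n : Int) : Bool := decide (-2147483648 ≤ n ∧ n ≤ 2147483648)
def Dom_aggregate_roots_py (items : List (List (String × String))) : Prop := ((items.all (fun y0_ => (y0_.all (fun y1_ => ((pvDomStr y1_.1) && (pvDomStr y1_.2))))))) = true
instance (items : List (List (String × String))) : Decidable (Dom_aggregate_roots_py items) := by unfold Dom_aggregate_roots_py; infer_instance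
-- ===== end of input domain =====

-- B replaces A's single hash-counting loop by sort + run-length grouping: the cleaned roots are
-- sorted once and a two-pointer scan over the sorted list yields the sorted unique roots and their
-- counts; objective: alternative, same results.

-- ===== PORT A =====
-- r = str(it.get("seed_root") or "").strip()  (it.get on the association list = first match; 'or ""' maps a missing or falsy (empty) value to "")
def pvRootOf (it : List (String × String)) : String :=
  PySem.Str.strip (((PySem.Dict.mk it).get? "seed_root").getD "")

def aggregate_roots_py (items : List (List (String × String))) : (List (String × Int)) × List String :=
  let st := items.foldl
    (fun (st : PySem.Dict String Int × List String) it =>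
      let r := pvRootOf it
      if r = "" then st
      else (st.1.insert r (st.1.getD r 0 + 1), st.2 ++ [r]))
    (PySem.Dict.empty, [])
  (st.1.items, PySem.List.sorted (PySem.Set.ofList st.2) (fun x => x) false)

-- ===== PORT B =====
-- the two-pointer while loops of Source B: each step peels one maximal run of equal adjacent
-- elements off the sorted list, recording its head and its length (j - i)
def pvRLE : List String → List String × List Int
  | [] => ([], [])
  | x :: xs =>
      let p := pvRLE (xs.dropWhile (fun y => y == x))
      (x :: p.1, (((xs.takeWhile (fun y => y == x)).length + 1 : Nat) : Int) :: p.2)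
  termination_by s => s.length
  decreasing_by
    simpa using Nat.lt_succ_of_le (List.length_dropWhile_le _ _)


def aggregate_roots_py_alt (items : List (List (String × String))) : (List (String × Int)) × List String :=
  let roots := (items.map pvRootOf).filter (fun r => r ≠ "")
  let srt := PySem.List.sorted roots (fun x => x) false
  let p := pvRLE srt
  -- counts = dict(zip(uniq_sorted, cnts)); the run heads are pairwise distinct, so the raw
  -- association list is that dict; counts[r] rendered total as getD (every r looked up is a key)
  let counts := PySem.Dict.mk (p.1.zip p.2)
  ((PySem.List.dedup roots).map (fun r => (r, counts.getD r 0)), p.1)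

-- ===== PRECONDITION & SPEC =====
def Spec_aggregate_roots_py (items : List (List (String × String))) (out : (List (String × Int)) × List String) : Prop := out = aggregate_roots_py_alt items
instance (items : List (List (String × String))) (out : (List (String × Int)) × List String) : Decidable (Spec_aggregate_roots_py items out) := by unfold Spec_aggregate_roots_py; infer_instance

-- ===== CLAIM (what is proved, stated in full; the proofs are below) =====
def Claim_equal_aggregate_roots_py : Prop := ∀ (items : List (List (String × String))), Dom_aggregate_roots_py items → Spec_aggregate_roots_py items (aggregate_roots_py items)

-- ===== LEMMAS AND PROOFS =====

-- the first element surviving dropWhile fails the predicate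
theorem pv_dropWhile_head_false {α : Type} (p : α → Bool) (l : List α) (y : α) (t : List α)
    (h : l.dropWhile p = y :: t) : p y = false := by
  induction l generalizing y t with
  | nil => simp at h
  | cons a l ih =>
    by_cases hp : p a
    · rw [List.dropWhile_cons_of_pos hp] at h
      exact ih _ _ h
    · rw [List.dropWhile_cons_of_neg hp] at h
      cases h
      simpa using hp

-- on a ≤-sorted list, the run-length encoding has strictly increasing heads, the heads are
-- exactly the elements of the list, and each count is that element's count in the list
theorem pvRLE_spec (s : List String) (h : s.Pairwise (· ≤ ·)) :
    (pvRLE s).1.Pairwise (· < ·) ∧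
    (∀ y, y ∈ (pvRLE s).1 ↔ y ∈ s) ∧
    (pvRLE s).2 = (pvRLE s).1.map (fun r => (s.count r : Int)) := by
  induction s using pvRLE.induct with
  | case1 => simp [pvRLE]
  | case2 x xs ih =>
    rw [List.pairwise_cons] at h
    obtain ⟨hxle, hpxs⟩ := h
    have hrest_pw : (xs.dropWhile (fun y => y == x)).Pairwise (· ≤ ·) :=
      List.Pairwise.sublist (List.dropWhile_sublist _) hpxs
    have hlt : ∀ y ∈ xs.dropWhile (fun y => y == x), x < y := by
      cases hrest0 : xs.dropWhile (fun y => y == x) with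
      | nil => intro y hy; simp at hy
      | cons y0 t =>
        have hy0 : y0 ≠ x := by
          have := pv_dropWhile_head_false (fun y => y == x) xs y0 t hrest0
          simpa using this
        have hmem0 : y0 ∈ xs := (List.dropWhile_sublist _).subset (by rw [hrest0]; simp)
        have hxy0 : x < y0 := lt_of_le_of_ne (hxle y0 hmem0) (Ne.symm hy0)
        intro y hy
        rcases List.mem_cons.mp hy with rfl | hyt
        · exact hxy0
        · have h01 : y0 ≤ y := (List.pairwise_cons.mp (hrest0 ▸ hrest_pw)).1 y hyt
          exact lt_of_lt_of_le hxy0 h01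
    have hnotmem : x ∉ xs.dropWhile (fun y => y == x) := fun hx => lt_irrefl x (hlt x hx)
    have hrunx : ∀ y ∈ xs.takeWhile (fun y => y == x), y = x := by
      intro y hy
      simpa using List.mem_takeWhile_imp hy
    obtain ⟨ih1, ih2, ih3⟩ := ih hrest_pw
    have hsplit : xs.takeWhile (fun y => y == x) ++ xs.dropWhile (fun y => y == x) = xs :=
      List.takeWhile_append_dropWhile
    refine ⟨?_, ?_, ?_⟩
    · simp only [pvRLE, List.pairwise_cons]
      exact ⟨fun u hu => hlt u ((ih2 u).mp hu), ih1⟩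
    · intro y
      simp only [pvRLE, List.mem_cons, ih2]
      constructor
      · rintro (rfl | hy)
        · exact Or.inl rfl
        · exact Or.inr ((List.dropWhile_sublist _).subset hy)
      · rintro (rfl | hy)
        · exact Or.inl rfl
        · rw [← hsplit] at hy
          rcases List.mem_append.mp hy with hrun | hrest
          · exact Or.inl (hrunx y hrun)
          · exact Or.inr hrest
    · simp only [pvRLE, List.map_cons, List.count_cons]
      congr 1
      · have h1 : (xs.takeWhile (fun y => y == x)).count x
            = (xs.takeWhile (fun y => y == x)).length :=
          List.count_eq_length.mpr (fun y hy => by simp [hrunx y hy])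
        have h2 : (xs.dropWhile (fun y => y == x)).count x = 0 :=
          List.count_eq_zero.mpr hnotmem
        have hc : xs.count x = (xs.takeWhile (fun y => y == x)).length := by
          conv_lhs => rw [← hsplit]
          rw [List.count_append, h1, h2]
          omega
        simp [hc]
      · rw [ih3]
        apply List.map_congr_left
        intro u hu
        have humem : u ∈ xs.dropWhile (fun y => y == x) := (ih2 u).mp hu
        have hune : u ≠ x := ne_of_gt (hlt u humem)
        have h0 : (xs.takeWhile (fun y => y == x)).count u = 0 :=
          List.count_eq_zero.mpr (fun hc => hune (hrunx u hc))
        have hc : xs.count u = (xs.dropWhile (fun y => y == x)).count u := by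
          conv_lhs => rw [← hsplit]
          rw [List.count_append, h0]
          omega
        have hxu : (x == u) = false := beq_eq_false_iff_ne.mpr (Ne.symm hune)
        simp [hc, hxu]

-- A's loop over items equals a counting fold over the cleaned non-empty roots, with the roots appended.
theorem pv_loop_eq (items : List (List (String × String)))
    (d : PySem.Dict String Int) (acc : List String) :
    items.foldl
      (fun (st : PySem.Dict String Int × List String) it =>
        let r := pvRootOf it
        if r = "" then st
        else (st.1.insert r (st.1.getD r 0 + 1), st.2 ++ [r]))
      (d, acc)
    = (((items.map pvRootOf).filter (fun r => r ≠ "")).foldl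
         (fun d r => d.insert r (d.getD r 0 + 1)) d,
       acc ++ (items.map pvRootOf).filter (fun r => r ≠ "")) := by
  induction items generalizing d acc with
  | nil => simp
  | cons it rest ih =>
    simp only [List.foldl_cons, List.map_cons, List.filter_cons]
    by_cases h : pvRootOf it = ""
    · simp only [h, decide_not, decide_true, Bool.not_true, Bool.false_eq_true,
        if_false, ih]
      simp
    · simp only [decide_not, h, decide_false, Bool.not_false, if_true, ih]
      simp

theorem aggregate_roots_py_spec' (items : List (List (String × String))) :
    aggregate_roots_py items = aggregate_roots_py_alt items := by
  unfold aggregate_roots_py aggregate_roots_py_alt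
  rw [pv_loop_eq]
  simp only [List.nil_append]
  rw [PySem.Dict.foldl_insert_getD_add_one_eq_counter, PySem.Dict.items_counter]
  set roots := (items.map pvRootOf).filter (fun r => r ≠ "") with hroots
  set srt := PySem.List.sorted roots (fun x => x) false with hsrt
  have hsrt_pw : srt.Pairwise (· ≤ ·) := PySem.List.sorted_pairwise roots (fun x => x)
  obtain ⟨h1, h2, h3⟩ := pvRLE_spec srt hsrt_pw
  have hperm : srt.Perm roots := PySem.List.sorted_perm roots (fun x => x) false
  have hmemroots : ∀ y, y ∈ (pvRLE srt).1 ↔ y ∈ roots := fun y => (h2 y).trans hperm.mem_iff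
  have hnd : (pvRLE srt).1.Nodup := h1.imp ne_of_lt
  have hpermSet : (pvRLE srt).1.Perm (PySem.Set.ofList roots) :=
    (List.perm_ext_iff_of_nodup hnd (PySem.Set.nodup_ofList roots)).mpr
      (fun y => (hmemroots y).trans (PySem.Set.mem_ofList roots y).symm)
  have hsorted_eq : PySem.List.sorted (PySem.Set.ofList roots) (fun x => x) false = (pvRLE srt).1 :=
    PySem.List.sorted_eq_of_perm_of_pairwise_lt _ _ _ hpermSet h1
  have hzip : (pvRLE srt).1.zip (pvRLE srt).2
      = (pvRLE srt).1.map (fun r => (r, (srt.count r : Int))) := by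
    rw [h3]
    exact List.map_prod_left_eq_zip.symm
  have hlookup : ∀ r ∈ roots,
      (PySem.Dict.mk ((pvRLE srt).1.zip (pvRLE srt).2)).getD r 0 = (roots.count r : Int) := by
    intro r hr
    have hrmem : r ∈ (pvRLE srt).1 := (hmemroots r).mpr hr
    have hitem : (r, (srt.count r : Int)) ∈ (PySem.Dict.mk ((pvRLE srt).1.zip (pvRLE srt).2)).items := by
      show _ ∈ (pvRLE srt).1.zip (pvRLE srt).2
      rw [hzip]
      exact List.mem_map_of_mem hrmem
    have hkeys : ((PySem.Dict.mk ((pvRLE srt).1.zip (pvRLE srt).2)).keys).Nodup := by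
      have : ((pvRLE srt).1.zip (pvRLE srt).2).map Prod.fst = (pvRLE srt).1 := by
        rw [hzip, List.map_map]
        exact List.map_id _
      simpa [PySem.Dict.keys_mk, this] using hnd
    rw [PySem.Dict.getD_of_mem_items _ hitem hkeys, hperm.count_eq]
  refine Prod.ext ?_ ?_
  · simp only [PySem.List.dedup_eq_ofList]
    apply List.map_congr_left
    intro k hk
    have hkroots : k ∈ roots := (PySem.Set.mem_ofList roots k).mp hk
    simp [hlookup k hkroots]
  · exact hsorted_eq

-- ===== VERDICT (by name: the statement is the Claim_ definition above) =====
theorem aggregate_roots_py_spec : Claim_equal_aggregate_roots_py := by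
  intro items _
  exact aggregate_roots_py_spec' items
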